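-- pv_equiv track=rewrite | github.com/PEXEL2002/PWR_Discrete_Process_Optimization | Zad1/zad1.py | C_max
-- ===== SOURCE A (Python) =====
-- def C_max(s):
--     t = s[0][0]
--     C = t + s[0][1]
--     C_max = C + s[0][2]
--     for j in range(1, len(s)):
--         t = max(s[j][0], C)
--         C = t + s[j][1]
--         C_max = max(C_max, C + s[j][2])
--     return C_max
-- ===== SOURCE B (Python) =====
-- def C_max(s):
--     # Prefix-sum reformulation: C_max = max over i<=j of r_i + sum_{k=i..j} p_k + q_j
--     #   = max_j [ (max_{i<=j} (r_i - P_{i-1})) + P_j + q_j ],  P_j = p_0+...+p_j.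
--     # One pass keeping the running prefix sum P and the running max of (r_i - P_{i-1}).
--     P = 0
--     best_start = None   # max over i so far of r_i - (prefix sum of p before job i)
--     ans = None
--     for r, p, q in s:
--         start = r - P
--         best_start = start if best_start is None else max(best_start, start)
--         P += p
--         cand = best_start + P + q
--         ans = cand if ans is None else max(ans, cand)
--     return ans
-- ===== Notes on version B (the rewrite author's own statement) =====
-- stated objective: alternative
-- what changed: B replaces A's max-plus DP recurrence C=max(r,C)+p with a prefix-sum reformulation: it keeps a running sum P of processing times and a running max of the transformed quantity r_i - P_{i-1}, so the answer is max_j (best_start + P_j + q_j) with no completion-time recurrence at all.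
import Mathlib
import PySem

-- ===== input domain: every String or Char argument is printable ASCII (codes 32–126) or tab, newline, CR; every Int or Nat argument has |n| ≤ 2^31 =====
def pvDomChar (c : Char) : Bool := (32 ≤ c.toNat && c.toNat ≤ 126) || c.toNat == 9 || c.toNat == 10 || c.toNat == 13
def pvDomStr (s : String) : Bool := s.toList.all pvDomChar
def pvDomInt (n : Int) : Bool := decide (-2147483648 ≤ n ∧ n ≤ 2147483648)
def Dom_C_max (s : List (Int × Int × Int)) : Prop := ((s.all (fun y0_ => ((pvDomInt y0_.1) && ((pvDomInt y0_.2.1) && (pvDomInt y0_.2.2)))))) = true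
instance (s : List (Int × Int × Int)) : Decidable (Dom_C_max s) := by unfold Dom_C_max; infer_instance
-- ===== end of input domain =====

-- B drops A's completion-time recurrence for a prefix-sum formulation (running sum of p, running max of r_i - prefix); return values agree on nonempty input.

-- ===== PORT A =====
-- A's single loop over j = 1..len-1 carrying (t, C, C_max); [] is excluded by Pre_ (Python raises IndexError at s[0]).
def C_max (s : List (Int × Int × Int)) : Int :=
  match s with
  | [] => 0
  | (a, b, c) :: rest =>
    let t := a
    let C := t + b
    let Cm := C + c
    let st := rest.foldl
      (fun (st : Int × Int × Int) (j : Int × Int × Int) =>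
        let t := max j.1 st.2.1
        let C := t + j.2.1
        (t, C, max st.2.2 (C + j.2.2)))
      (t, C, Cm)
    st.2.2

-- ===== PORT B =====
-- Source B's single loop carrying (P, best_start, ans) with the None-initialised maxima as Options.
def C_max_alt (s : List (Int × Int × Int)) : Int :=
  let st := s.foldl
    (fun (st : Int × Option Int × Option Int) (j : Int × Int × Int) =>
      let P := st.1
      let start := j.1 - P
      let bs := match st.2.1 with
        | none => start
        | some b => max b start
      let P' := P + j.2.1
      let cand := bs + P' + j.2.2
      let ans := match st.2.2 with
        | none => cand
        | some a => max a cand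
      (P', some bs, some ans))
    (0, none, none)
  match st.2.2 with
  | none => 0          -- unreachable under Pre_ (s nonempty); Python b returns None on []
  | some a => a

-- ===== PRECONDITION & SPEC =====
-- Pre_ excludes only the empty list, on which Python A raises IndexError (s[0]).
def Pre_C_max (s : List (Int × Int × Int)) : Prop := s ≠ []
instance (s : List (Int × Int × Int)) : Decidable (Pre_C_max s) := by unfold Pre_C_max; infer_instance
def pvWitness_C_max : (List (Int × Int × Int)) := [(1, 2, 3)]

def Spec_C_max (s : List (Int × Int × Int)) (out : Int) : Prop := out = C_max_alt s
instance (s : List (Int × Int × Int)) (out : Int) : Decidable (Spec_C_max s out) := by unfold Spec_C_max; infer_instance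

-- ===== CLAIM =====
def Claim_equal_C_max : Prop := ∀ (s : List (Int × Int × Int)), Dom_C_max s → Pre_C_max s → Spec_C_max s (C_max s)

-- ===== LEMMAS AND PROOFS =====

theorem pv_max_shift (bs P r p : Int) :
    max r (bs + P) + p = max bs (r - P) + (P + p) := by omega

theorem pv_max_shift2 (Cm bs P r p q : Int) :
    max Cm (max r (bs + P) + p + q) = max Cm (max bs (r - P) + (P + p) + q) := by omega

-- Invariant linking the two folds: A's C equals B's best_start + P, A's C_max equals B's ans.
theorem pv_key (rest : List (Int × Int × Int)) : ∀ (t C Cm P bs ans : Int),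
    C = bs + P → Cm = ans →
    (rest.foldl
      (fun (st : Int × Int × Int) (j : Int × Int × Int) =>
        let t := max j.1 st.2.1
        let C := t + j.2.1
        (t, C, max st.2.2 (C + j.2.2)))
      (t, C, Cm)).2.2
    =
    (match (rest.foldl
      (fun (st : Int × Option Int × Option Int) (j : Int × Int × Int) =>
        let P := st.1
        let start := j.1 - P
        let bs := match st.2.1 with
          | none => start
          | some b => max b start
        let P' := P + j.2.1
        let cand := bs + P' + j.2.2
        let ans := match st.2.2 with
          | none => cand
          | some a => max a cand
        (P', some bs, some ans))
      (P, some bs, some ans)).2.2 with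
      | none => 0
      | some a => a) := by
  induction rest with
  | nil => intro t C Cm P bs ans h1 h2; simp [List.foldl, h2]
  | cons hd tl ih =>
    intro t C Cm P bs ans h1 h2
    obtain ⟨r, p, q⟩ := hd
    simp only [List.foldl]
    apply ih
    · -- max r C + p = max bs (r - P) + (P + p)
      subst h1; exact pv_max_shift bs P r p
    · -- max Cm (max r C + p + q) = max ans (max bs (r-P) + (P+p) + q)
      subst h1 h2; exact pv_max_shift2 _ bs P r p q

-- ===== VERDICT =====
theorem C_max_spec : Claim_equal_C_max := by
  intro s _ hpre
  match s with
  | [] => exact absurd rfl hpre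
  | (a, b, c) :: rest =>
    show C_max _ = C_max_alt _
    simp only [C_max, C_max_alt, List.foldl]
    exact pv_key rest a (a + b) (a + b + c) (0 + b) (a - 0) (a - 0 + (0 + b) + c) (by omega) (by omega)
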